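-- pv_equiv track=rewrite | github.com/yoavjavits/KeyboardHandProject | CharacterModel/evaluate_sentences.py | get_word_lengths
-- ===== SOURCE A (Python) =====
-- def get_word_lengths(sentence_, backspace_id):
--     word_lengths = []
--
--     curr_index = 0
--     while curr_index < len(sentence_):
--         word = []
--         while curr_index < len(sentence_) and sentence_[curr_index] != backspace_id:
--             word.append(sentence_[curr_index])
--             curr_index += 1
--
--         word_lengths.append(len(word))
--         curr_index += 1
--
--     return word_lengths
-- ===== SOURCE B (Python) =====
-- def get_word_lengths(sentence_, backspace_id):
--     positions = [i for i, x in enumerate(sentence_) if x == backspace_id]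
--     out = []
--     prev = -1
--     for p in positions:
--         out.append(p - prev - 1)
--         prev = p
--     trailing = len(sentence_) - prev - 1
--     if trailing > 0:
--         out.append(trailing)
--     return out
-- ===== Notes on version B (the rewrite author's own statement) =====
-- stated objective: alternative
-- what changed: Replaces A's nested while loops over characters with a delimiter-position index list followed by gap arithmetic (p - prev - 1) and a trailing>0 guard.
import Mathlib
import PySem

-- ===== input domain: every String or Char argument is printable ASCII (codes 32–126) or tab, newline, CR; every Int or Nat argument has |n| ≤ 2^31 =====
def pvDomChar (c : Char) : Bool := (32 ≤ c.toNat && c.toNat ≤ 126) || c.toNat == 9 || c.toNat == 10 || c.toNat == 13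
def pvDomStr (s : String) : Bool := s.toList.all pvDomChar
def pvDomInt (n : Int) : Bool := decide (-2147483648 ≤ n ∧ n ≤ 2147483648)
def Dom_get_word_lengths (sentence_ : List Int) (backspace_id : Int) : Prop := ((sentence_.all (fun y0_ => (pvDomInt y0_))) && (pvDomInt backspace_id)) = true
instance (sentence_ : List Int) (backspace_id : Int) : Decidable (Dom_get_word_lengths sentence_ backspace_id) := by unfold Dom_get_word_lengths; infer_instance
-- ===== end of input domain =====

-- B replaces A's nested character-scanning while loops by a delimiter-position list plus gap arithmetic (alternative decomposition, same cost).

-- ===== PORT A =====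
-- inner while loop of A: the word collected before the next delimiter
def pvWordOf (b : Int) : List Int → List Int
  | [] => []
  | x :: xs => if x ≠ b then x :: pvWordOf b xs else []

-- the rest of the sentence from where the inner loop stopped (delimiter still in front)
def pvRestOf (b : Int) : List Int → List Int
  | [] => []
  | x :: xs => if x ≠ b then pvRestOf b xs else x :: xs

theorem pvRestOf_length_le (b : Int) (s : List Int) : (pvRestOf b s).length ≤ s.length := by
  induction s with
  | nil => simp [pvRestOf]
  | cons x xs ih =>
    simp only [pvRestOf]
    split
    · exact Nat.le_succ_of_le ih
    · simp

-- outer while loop of A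
def get_word_lengths (sentence_ : List Int) (backspace_id : Int) : List Int :=
  if _h : sentence_ = [] then []
  else
    ((pvWordOf backspace_id sentence_).length : Int) ::
      get_word_lengths ((pvRestOf backspace_id sentence_).drop 1) backspace_id
termination_by sentence_.length
decreasing_by
  have hle := pvRestOf_length_le backspace_id sentence_
  have hpos : 0 < sentence_.length := List.length_pos_iff.mpr _h
  simp only [List.length_drop]
  omega

-- ===== PORT B =====
-- positions = [i for i, x in enumerate(sentence_) if x == backspace_id]
def pvPositionsFrom (b : Int) (i : Int) : List Int → List Int
  | [] => []
  | x :: xs => if x = b then i :: pvPositionsFrom b (i + 1) xs else pvPositionsFrom b (i + 1) xs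

def get_word_lengths_alt (sentence_ : List Int) (backspace_id : Int) : List Int :=
  let positions := pvPositionsFrom backspace_id 0 sentence_
  let st := positions.foldl (fun (acc : List Int × Int) p => (acc.1 ++ [p - acc.2 - 1], p)) ([], -1)
  let trailing : Int := (sentence_.length : Int) - st.2 - 1
  if trailing > 0 then st.1 ++ [trailing] else st.1

-- ===== PRECONDITION & SPEC =====
def Spec_get_word_lengths (sentence_ : List Int) (backspace_id : Int) (out : List Int) : Prop := out = get_word_lengths_alt sentence_ backspace_id
instance (sentence_ : List Int) (backspace_id : Int) (out : List Int) : Decidable (Spec_get_word_lengths sentence_ backspace_id out) := by unfold Spec_get_word_lengths; infer_instance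

-- ===== CLAIM (what is proved, stated in full; the proofs are below) =====
def Claim_equal_get_word_lengths : Prop := ∀ (sentence_ : List Int) (backspace_id : Int), Dom_get_word_lengths sentence_ backspace_id → Spec_get_word_lengths sentence_ backspace_id (get_word_lengths sentence_ backspace_id)

-- ===== LEMMAS AND PROOFS =====

-- the gap list and the final prev produced by B's for-loop, as direct recursions
def pvGaps : List Int → Int → List Int
  | [], _ => []
  | p :: ps, prev => (p - prev - 1) :: pvGaps ps p

def pvLastPrev : List Int → Int → Int
  | [], prev => prev
  | p :: ps, _ => pvLastPrev ps p

theorem pvFoldl_gaps (ps : List Int) (acc : List Int) (prev : Int) :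
    ps.foldl (fun (acc : List Int × Int) p => (acc.1 ++ [p - acc.2 - 1], p)) (acc, prev)
      = (acc ++ pvGaps ps prev, pvLastPrev ps prev) := by
  induction ps generalizing acc prev with
  | nil => simp [pvGaps, pvLastPrev]
  | cons p ps ih => simp [pvGaps, pvLastPrev, ih]

theorem pvPositionsFrom_shift (b k i : Int) (s : List Int) :
    pvPositionsFrom b (i + k) s = (pvPositionsFrom b i s).map (· + k) := by
  induction s generalizing i with
  | nil => simp [pvPositionsFrom]
  | cons x xs ih =>
    simp only [pvPositionsFrom]
    split
    · simp [← ih, add_right_comm]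
    · rw [← ih, add_right_comm]

theorem pvPositionsFrom_from_zero (b k : Int) (s : List Int) :
    pvPositionsFrom b k s = (pvPositionsFrom b 0 s).map (· + k) := by
  simpa using pvPositionsFrom_shift b k 0 s

theorem pvGaps_shift (ps : List Int) (k q : Int) :
    pvGaps (ps.map (· + k)) q = pvGaps ps (q - k) := by
  induction ps generalizing q with
  | nil => simp [pvGaps]
  | cons p ps ih =>
    simp only [List.map_cons, pvGaps, ih]
    have h : p + k - k = p := by ring
    rw [h]
    congr 1
    ring

theorem pvLastPrev_shift (ps : List Int) (k q : Int) :
    pvLastPrev (ps.map (· + k)) q = pvLastPrev ps (q - k) + k := by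
  induction ps generalizing q with
  | nil => simp [pvLastPrev]
  | cons p ps ih => simp [pvLastPrev, ih]

-- decomposition facts about A's helpers
theorem pvWord_append_rest (b : Int) (s : List Int) :
    pvWordOf b s ++ pvRestOf b s = s := by
  induction s with
  | nil => simp [pvWordOf, pvRestOf]
  | cons x xs ih =>
    simp only [pvWordOf, pvRestOf]
    split <;> simp [ih]

theorem pvWordOf_ne (b : Int) (s : List Int) : ∀ x ∈ pvWordOf b s, x ≠ b := by
  induction s with
  | nil => simp [pvWordOf]
  | cons y ys ih =>
    simp only [pvWordOf]
    split
    · intro x hx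
      rcases List.mem_cons.mp hx with h | h
      · subst h; assumption
      · exact ih x h
    · simp

theorem pvRestOf_shape (b : Int) (s : List Int) :
    pvRestOf b s = [] ∨ ∃ t, pvRestOf b s = b :: t := by
  induction s with
  | nil => simp [pvRestOf]
  | cons x xs ih =>
    simp only [pvRestOf]
    split
    · exact ih
    · right; exact ⟨xs, by simp_all⟩

theorem pvPositionsFrom_none (b i : Int) (w : List Int) (hw : ∀ x ∈ w, x ≠ b) :
    pvPositionsFrom b i w = [] := by
  induction w generalizing i with
  | nil => rfl
  | cons x xs ih =>
    simp only [pvPositionsFrom]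
    rw [if_neg (hw x (by simp))]
    exact ih _ (fun y hy => hw y (by simp [hy]))

theorem pvPositionsFrom_append_delim (b i : Int) (w t : List Int) (hw : ∀ x ∈ w, x ≠ b) :
    pvPositionsFrom b i (w ++ b :: t) = (i + w.length) :: pvPositionsFrom b (i + w.length + 1) t := by
  induction w generalizing i with
  | nil => simp [pvPositionsFrom]
  | cons x xs ih =>
    simp only [List.cons_append, pvPositionsFrom]
    rw [if_neg (hw x (by simp)), ih _ (fun y hy => hw y (by simp [hy]))]
    simp only [List.length_cons]
    push_cast
    rw [show i + 1 + (xs.length : Int) + 1 = i + ((xs.length : Int) + 1) + 1 from by ring,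
      show i + 1 + (xs.length : Int) = i + ((xs.length : Int) + 1) from by ring]

-- B's result on a sentence with no delimiter
theorem alt_no_delim (b : Int) (s : List Int) (hs : ∀ x ∈ s, x ≠ b) :
    get_word_lengths_alt s b = if (s.length : Int) > 0 then [(s.length : Int)] else [] := by
  simp [get_word_lengths_alt, pvPositionsFrom_none b 0 s hs]

-- B's result peels off the first word and its delimiter
theorem alt_cons (b : Int) (w t : List Int) (hw : ∀ x ∈ w, x ≠ b) :
    get_word_lengths_alt (w ++ b :: t) b = (w.length : Int) :: get_word_lengths_alt t b := by
  simp only [get_word_lengths_alt, pvPositionsFrom_append_delim b 0 w t hw, zero_add,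
    pvFoldl_gaps, List.nil_append, pvGaps, pvLastPrev]
  rw [pvPositionsFrom_from_zero b ((w.length : Int) + 1) t, pvGaps_shift, pvLastPrev_shift]
  have h1 : (w.length : Int) - ((w.length : Int) + 1) = -1 := by ring
  rw [h1]
  have h2 : (w.length : Int) - -1 - 1 = (w.length : Int) := by ring
  rw [h2]
  have hlen : ((w ++ b :: t).length : Int) = (w.length : Int) + 1 + (t.length : Int) := by
    push_cast [List.length_append, List.length_cons]; ring
  rw [hlen]
  have htr : (w.length : Int) + 1 + (t.length : Int)
        - (pvLastPrev (pvPositionsFrom b 0 t) (-1) + ((w.length : Int) + 1)) - 1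
      = (t.length : Int) - pvLastPrev (pvPositionsFrom b 0 t) (-1) - 1 := by ring
  rw [htr]
  split <;> simp

theorem main_eq_bounded (b : Int) : ∀ (n : Nat) (s : List Int), s.length ≤ n →
    get_word_lengths s b = get_word_lengths_alt s b := by
  intro n
  induction n with
  | zero =>
    intro s hs
    have : s = [] := List.length_eq_zero_iff.mp (Nat.le_zero.mp hs)
    subst this
    rw [get_word_lengths]
    simp [get_word_lengths_alt, pvPositionsFrom]
  | succ n ih =>
    intro s hs
    rcases heq : s with _ | ⟨x, xs⟩
    · rw [get_word_lengths]
      simp [get_word_lengths_alt, pvPositionsFrom]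
    · subst heq
      rw [get_word_lengths, dif_neg (by simp)]
      have hdecomp := pvWord_append_rest b (x :: xs)
      have hw := pvWordOf_ne b (x :: xs)
      rcases pvRestOf_shape b (x :: xs) with hrest | ⟨t, hrest⟩
      · -- no delimiter: the whole sentence is a single word
        rw [hrest, List.append_nil] at hdecomp
        have hs' : ∀ y ∈ (x :: xs), y ≠ b := by
          intro y hy
          refine hw y ?_
          rw [← hdecomp] at hy
          exact hy
        rw [hrest]
        simp only [List.drop_nil]
        rw [get_word_lengths]
        simp only [dif_pos]
        rw [alt_no_delim b (x :: xs) hs', hdecomp]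
        simp
      · -- first delimiter found: peel the word, recurse on t
        rw [hrest] at hdecomp
        have hlen : t.length ≤ n := by
          have : (x :: xs).length = (pvWordOf b (x :: xs)).length + 1 + t.length := by
            conv_lhs => rw [← hdecomp]
            simp
            omega
          omega
        rw [hrest]
        simp only [List.drop_succ_cons, List.drop_zero]
        rw [ih t hlen]
        conv_rhs => rw [← hdecomp]
        rw [alt_cons b _ t hw]

-- ===== VERDICT (by name: the statement is the Claim_ definition above) =====
theorem get_word_lengths_spec : Claim_equal_get_word_lengths := by
  intro s b _
  exact (main_eq_bounded b s.length s le_rfl).symm ▸ rfl
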